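-- pv_equiv track=rewrite | github.com/afontana1/Data-Engineering | Algorithms & Data Structures/Algorithms-on-Graphs/Week2/strongly_connected.py | dfs
-- ===== SOURCE A (Python) =====
-- def previsit(v, pre, clock):  # update previsit order
--     pre[v] = clock
--     clock += 1
--     return clock
--
-- def postvisit(v, post, clock):  # update postvisit order
--     post[v] = clock
--     clock += 1
--     return clock
--
-- def explore(
--     v, visit, radj, pre, post, clock, stack
-- ):  # The explore algorithm associated with depth first search of the reversed graph
--     visit[v] = 1  # update the visit status of node v
--     clock = previsit(v, pre, clock)  # calculate the previsit order of node v
--     for w in radj[v]:  # explore neighborhoods of v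
--         if visit[w] == 0:
--             clock = explore(w, visit, radj, pre, post, clock, stack)
--     stack.append(v)  # append v in ascending order of postvisit in the reversed graph
--     clock = postvisit(v, post, clock)  # calculate the postvisit order of node v
--     return clock
--
-- def dfs(radj):  # A depth first search for reversed graph
--     n = len(radj)
--     visit = [
--         0
--     ] * n  # visit: if each vertex in the reversed graph is visited (1 if yes, 0 if no)
--     clock = 0  # Initialize the clock
--     pre, post = [0] * n, [0] * n  # preorder and postorder visits for vertices
--     stack = (
--         []
--     )  # a LIFO queue to store the nodes in ascending postvisit order in the reversed graph
--     for v in range(n):  # Do a depth first search to explore unvisited vertices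
--         if visit[v] == 0:
--             clock = explore(v, visit, radj, pre, post, clock, stack)
--     return stack
-- ===== SOURCE B (Python) =====
-- def dfs(radj):  # iterative DFS over the reversed graph: explicit frame stack, postorder output
--     n = len(radj)
--     visited = [0] * n
--     order = []
--     for s in range(n):
--         if visited[s] == 0:
--             visited[s] = 1
--             frames = [(s, 0)]
--             while frames:
--                 v, i = frames[-1]
--                 nbrs = radj[v]
--                 if i < len(nbrs):
--                     frames[-1] = (v, i + 1)
--                     w = nbrs[i]
--                     if visited[w] == 0:
--                         visited[w] = 1
--                         frames.append((w, 0))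
--                 else:
--                     frames.pop()
--                     order.append(v)
--     return order
-- ===== Notes on version B (the rewrite author's own statement) =====
-- stated objective: alternative
-- what changed: A's recursive explore() with pre/post/clock bookkeeping is replaced by an iterative DFS using an explicit (vertex, neighbour-index) frame stack that marks on discovery and emits on frame exhaustion; the clock/pre/post machinery is dropped since only the postorder list is returned.
import Mathlib
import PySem

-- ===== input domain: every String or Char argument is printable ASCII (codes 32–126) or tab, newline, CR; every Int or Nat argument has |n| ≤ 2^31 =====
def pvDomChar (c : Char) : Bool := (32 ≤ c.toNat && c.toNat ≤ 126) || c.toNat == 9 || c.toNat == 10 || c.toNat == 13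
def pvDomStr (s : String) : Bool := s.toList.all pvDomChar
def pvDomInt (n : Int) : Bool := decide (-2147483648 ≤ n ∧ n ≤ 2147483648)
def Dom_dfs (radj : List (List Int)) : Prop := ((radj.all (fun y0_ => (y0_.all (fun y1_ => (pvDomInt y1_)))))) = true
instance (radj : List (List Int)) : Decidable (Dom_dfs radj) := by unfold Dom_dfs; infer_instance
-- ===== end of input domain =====

-- B is an iterative DFS with an explicit frame stack replacing A's recursion; equal return value, the
-- pre/post/clock bookkeeping of A is dropped since only the postorder list is returned.

-- ===== shared Python-indexing helpers (used by both ports; exact Python semantics via PySem) =====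

-- visit[w] read: Python raises IndexError out of range (excluded by Pre_); default 1 ("visited") there
def getV (xs : List Int) (i : Int) : Int := PySem.List.pyGetD xs i 1
-- visit[w] = x: Python raises IndexError out of range (excluded by Pre_); identity there
def setV (xs : List Int) (i : Int) (x : Int) : List Int := PySem.List.pySetD xs i x
-- radj[v]: Python raises IndexError out of range (excluded by Pre_); [] there
def getL (radj : List (List Int)) (v : Int) : List Int := PySem.List.pyGetD radj v []

-- number of unvisited slots (termination measures for both ports)
def Zv (xs : List Int) : Nat := xs.count 0
-- total edge count bound
def Eb (radj : List (List Int)) : Nat := (radj.map List.length).sum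

-- ===== PORT A =====

structure StA where
  visit : List Int
  pre : List Int
  post : List Int
  clock : Int
  stack : List Int

-- explore(v, visit, radj, pre, post, clock, stack); the "for w in radj[v]" loop is the foldl;
-- fuel only totalizes the recursion (depth is bounded by the number of unvisited vertices;
-- none is never reached from dfs, proved below)
def exploreA : Nat → List (List Int) → Int → StA → Option StA
  | 0, _, _, _ => none
  | f + 1, radj, v, st =>
    ((getL radj v).foldl
        (fun ost w => ost.bind fun st' =>
          if getV st'.visit w = 0 then exploreA f radj w st' else some st')
        (some { st with visit := setV st.visit v 1, pre := setV st.pre v st.clock,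
                        clock := st.clock + 1 })).map
      (fun st2 => { st2 with post := setV st2.post v st2.clock, clock := st2.clock + 1,
                             stack := st2.stack ++ [v] })

-- the "for v in range(n)" loop of dfs
def dfsLoopA (fuel : Nat) (radj : List (List Int)) : List Int → StA → Option StA
  | [], st => some st
  | v :: vs, st =>
    if getV st.visit v = 0 then
      match exploreA fuel radj v st with
      | none => none
      | some st' => dfsLoopA fuel radj vs st'
    else dfsLoopA fuel radj vs st

def dfs (radj : List (List Int)) : List Int :=
  match dfsLoopA (radj.length + 1) radj (PySem.List.pyRange 0 (radj.length : Int) 1)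
      ⟨List.replicate radj.length 0, List.replicate radj.length 0,
       List.replicate radj.length 0, 0, []⟩ with
  | some st => st.stack
  | none => []  -- unreachable: fuel n+1 always suffices (exploreA_suff below)

-- ===== PORT B =====

-- termination measure of Source B's while loop, used as fuel below
def muB (radj : List (List Int)) (visited : List Int) (stack : List (Int × Nat)) : Nat :=
  Zv visited * (Eb radj + 1) +
    (stack.map (fun p => (getL radj p.1).length - p.2)).sum + stack.length

-- the "while frames:" loop of Source B; the fuel only totalizes the loop (it is called with
-- fuel = muB + 1, which always suffices: the fuel-exhausted branch is unreachable, proved below)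
def loopB : Nat → List (List Int) → List Int → List Int → List (Int × Nat) →
    List Int × List Int
  | _, _, visited, order, [] => (visited, order)
  | 0, _, visited, order, _ => (visited, order)  -- fuel exhausted: unreachable from dfs_alt
  | f + 1, radj, visited, order, (v, i) :: rest =>
    if h : i < (getL radj v).length then
      if getV visited ((getL radj v)[i]) = 0 then
        loopB f radj (setV visited ((getL radj v)[i]) 1) order
          (((getL radj v)[i], 0) :: (v, i + 1) :: rest)
      else
        loopB f radj visited order ((v, i + 1) :: rest)
    else
      loopB f radj visited (order ++ [v]) rest

-- the "for s in range(n)" loop of Source B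
def dfsOuterB (radj : List (List Int)) : List Int → List Int → List Int → List Int × List Int
  | [], visited, order => (visited, order)
  | s :: vs, visited, order =>
    if getV visited s = 0 then
      let p := loopB (muB radj (setV visited s 1) [(s, 0)] + 1) radj
        (setV visited s 1) order [(s, 0)]
      dfsOuterB radj vs p.1 p.2
    else dfsOuterB radj vs visited order

def dfs_alt (radj : List (List Int)) : List Int :=
  (dfsOuterB radj (PySem.List.pyRange 0 (radj.length : Int) 1)
    (List.replicate radj.length 0) []).2

-- ===== PRECONDITION & SPEC =====

-- Exactly the inputs on which the Python A returns normally: every listed neighbour w must be a valid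
-- Python index into the n vertex lists (-n ≤ w < n, negative = wraparound), otherwise visit[w] raises
-- IndexError.
def Pre_dfs (radj : List (List Int)) : Prop :=
  ∀ nbrs ∈ radj, ∀ w ∈ nbrs, -(radj.length : Int) ≤ w ∧ w < (radj.length : Int)
instance (radj : List (List Int)) : Decidable (Pre_dfs radj) := by unfold Pre_dfs; infer_instance

def pvWitness_dfs : List (List Int) := [[1], [0, -2]]

def Spec_dfs (radj : List (List Int)) (out : List Int) : Prop := out = dfs_alt radj
instance (radj : List (List Int)) (out : List Int) : Decidable (Spec_dfs radj out) := by
  unfold Spec_dfs; infer_instance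

-- ===== CLAIM (what is proved, stated in full; the proofs are below) =====
def Claim_equal_dfs : Prop :=
  ∀ (radj : List (List Int)), Dom_dfs radj → Pre_dfs radj → Spec_dfs radj (dfs radj)

-- ===== LEMMAS AND PROOFS =====

theorem pyIdx_lt {n : Nat} {i : Int} {k : Nat} (h : PySem.List.pyIdx? n i = some k) : k < n := by
  unfold PySem.List.pyIdx? at h
  split at h <;> split at h <;> simp_all <;> omega

theorem getV_zero_inv {xs : List Int} {i : Int} (h : getV xs i = 0) :
    ∃ k, PySem.List.pyIdx? xs.length i = some k ∧ k < xs.length ∧ xs[k]? = some 0 := by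
  unfold getV PySem.List.pyGetD PySem.List.pyGet? at h
  cases hk : PySem.List.pyIdx? xs.length i with
  | none => rw [hk] at h; simp at h
  | some k =>
    rw [hk] at h
    simp only [Option.bind_some] at h
    cases hx : xs[k]? with
    | none => rw [hx] at h; simp at h
    | some a =>
      rw [hx] at h; simp at h
      exact ⟨k, rfl, pyIdx_lt hk, by rw [hx, h]⟩

theorem Zv_setV {xs : List Int} {i : Int} (h : getV xs i = 0) :
    Zv (setV xs i 1) + 1 = Zv xs := by
  obtain ⟨k, hk, hlt, hx⟩ := getV_zero_inv h
  have hxk : xs[k] = (0 : Int) := by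
    obtain ⟨_, e⟩ := List.getElem?_eq_some_iff.mp hx
    exact e
  have hset : setV xs i 1 = xs.set k 1 := by
    unfold setV PySem.List.pySetD PySem.List.pySet?
    rw [hk]; rfl
  have hcnt := List.count_set (a := (1 : Int)) (b := (0 : Int)) (l := xs) hlt
  have hpos : 0 < xs.count 0 :=
    List.count_pos_iff.mpr (by rw [← hxk]; exact List.getElem_mem hlt)
  unfold Zv
  rw [hset, hcnt, hxk]
  simp
  omega

theorem getL_len_le (radj : List (List Int)) (v : Int) : (getL radj v).length ≤ Eb radj := by
  unfold getL PySem.List.pyGetD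
  cases hg : PySem.List.pyGet? radj v with
  | none => simp [Eb]
  | some l =>
    have hm := PySem.List.mem_of_pyGet?_eq_some _ hg
    simp only [Option.getD_some]
    exact List.single_le_sum (fun x _ => Nat.zero_le x) _ (List.mem_map_of_mem hm)

-- the three decrease facts of loopB's measure, as named lemmas (kept out of loopB's term)
theorem decPush (radj : List (List Int)) (visited : List Int) (v : Int) (i : Nat)
    (rest : List (Int × Nat)) (h : i < (getL radj v).length)
    (hg : getV visited ((getL radj v)[i]) = 0) :
    Zv (setV visited ((getL radj v)[i]) 1) * (Eb radj + 1) +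
        (List.map (fun p => (getL radj p.1).length - p.2)
          (((getL radj v)[i], 0) :: (v, i + 1) :: rest)).sum +
      (((getL radj v)[i], 0) :: (v, i + 1) :: rest).length <
    Zv visited * (Eb radj + 1) +
        (List.map (fun p => (getL radj p.1).length - p.2) ((v, i) :: rest)).sum +
      ((v, i) :: rest).length := by
  have h1 := Zv_setV hg
  have h2 := getL_len_le radj ((getL radj v)[i])
  have e : Zv visited = Zv (setV visited ((getL radj v)[i]) 1) + 1 := h1.symm
  rw [e, Nat.succ_mul]
  simp only [List.map_cons, List.sum_cons, List.length_cons]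
  omega

theorem decSkip (radj : List (List Int)) (visited : List Int) (v : Int) (i : Nat)
    (rest : List (Int × Nat)) (h : i < (getL radj v).length) :
    Zv visited * (Eb radj + 1) +
        (List.map (fun p => (getL radj p.1).length - p.2) ((v, i + 1) :: rest)).sum +
      ((v, i + 1) :: rest).length <
    Zv visited * (Eb radj + 1) +
        (List.map (fun p => (getL radj p.1).length - p.2) ((v, i) :: rest)).sum +
      ((v, i) :: rest).length := by
  simp only [List.map_cons, List.sum_cons, List.length_cons]
  omega

theorem decPop (radj : List (List Int)) (visited : List Int) (v : Int) (i : Nat)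
    (rest : List (Int × Nat)) :
    Zv visited * (Eb radj + 1) +
        (List.map (fun p => (getL radj p.1).length - p.2) rest).sum + rest.length <
    Zv visited * (Eb radj + 1) +
        (List.map (fun p => (getL radj p.1).length - p.2) ((v, i) :: rest)).sum +
      ((v, i) :: rest).length := by
  simp only [List.map_cons, List.sum_cons, List.length_cons]
  omega

-- equations and fuel-irrelevance of loopB
theorem loopB_nil_eq (f : Nat) (radj : List (List Int)) (visited order : List Int) :
    loopB f radj visited order [] = (visited, order) := by cases f <;> rfl

theorem loopB_succ_cons (f : Nat) (radj : List (List Int)) (visited order : List Int)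
    (v : Int) (i : Nat) (rest : List (Int × Nat)) :
    loopB (f + 1) radj visited order ((v, i) :: rest) =
      if h : i < (getL radj v).length then
        if getV visited ((getL radj v)[i]) = 0 then
          loopB f radj (setV visited ((getL radj v)[i]) 1) order
            (((getL radj v)[i], 0) :: (v, i + 1) :: rest)
        else
          loopB f radj visited order ((v, i + 1) :: rest)
      else
        loopB f radj visited (order ++ [v]) rest := rfl

theorem muB_cons_pos (radj : List (List Int)) (visited : List Int) (v : Int) (i : Nat)
    (rest : List (Int × Nat)) : 1 ≤ muB radj visited ((v, i) :: rest) := by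
  simp [muB]
  omega

theorem loopB_irrel : ∀ (b f1 f2 : Nat) (radj : List (List Int)) (visited order : List Int)
    (stack : List (Int × Nat)), muB radj visited stack ≤ b →
    muB radj visited stack < f1 → muB radj visited stack < f2 →
    loopB f1 radj visited order stack = loopB f2 radj visited order stack := by
  intro b
  induction b with
  | zero =>
    intro f1 f2 radj visited order stack hb _ _
    cases stack with
    | nil => rw [loopB_nil_eq, loopB_nil_eq]
    | cons p rest =>
      obtain ⟨v, i⟩ := p
      have := muB_cons_pos radj visited v i rest; omega
  | succ b ih =>
    intro f1 f2 radj visited order stack hb h1 h2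
    cases stack with
    | nil => rw [loopB_nil_eq, loopB_nil_eq]
    | cons p rest =>
      obtain ⟨v, i⟩ := p
      have hpos := muB_cons_pos radj visited v i rest
      cases f1 with
      | zero => omega
      | succ g1 =>
        cases f2 with
        | zero => omega
        | succ g2 =>
          rw [loopB_succ_cons, loopB_succ_cons]
          by_cases h : i < (getL radj v).length
          · rw [dif_pos h, dif_pos h]
            by_cases hg : getV visited ((getL radj v)[i]) = 0
            · rw [if_pos hg, if_pos hg]
              have hd := decPush radj visited v i rest h hg
              exact ih g1 g2 radj _ order _ (by unfold muB at *; omega)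
                (by unfold muB at *; omega) (by unfold muB at *; omega)
            · rw [if_neg hg, if_neg hg]
              have hd := decSkip radj visited v i rest h
              exact ih g1 g2 radj _ order _ (by unfold muB at *; omega)
                (by unfold muB at *; omega) (by unfold muB at *; omega)
          · rw [dif_neg h, dif_neg h]
            have hd := decPop radj visited v i rest
            exact ih g1 g2 radj _ _ _ (by unfold muB at *; omega)
              (by unfold muB at *; omega) (by unfold muB at *; omega)

-- Source B's loop with always-sufficient fuel; dfsOuterB's call is literally runB
def runB (radj : List (List Int)) (visited order : List Int) (stack : List (Int × Nat)) :
    List Int × List Int :=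
  loopB (muB radj visited stack + 1) radj visited order stack

theorem loopB_nil (radj : List (List Int)) (visited order : List Int) :
    runB radj visited order [] = (visited, order) := rfl

theorem loopB_push {radj : List (List Int)} {visited : List Int} {v : Int} {i : Nat}
    (h : i < (getL radj v).length) (hg : getV visited ((getL radj v)[i]) = 0)
    (order : List Int) (rest : List (Int × Nat)) :
    runB radj visited order ((v, i) :: rest) =
      runB radj (setV visited ((getL radj v)[i]) 1) order
        (((getL radj v)[i], 0) :: (v, i + 1) :: rest) := by
  unfold runB
  rw [loopB_succ_cons, dif_pos h, if_pos hg]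
  have hd := decPush radj visited v i rest h hg
  exact loopB_irrel (muB radj visited ((v, i) :: rest)) _ _ radj _ order _
    (by unfold muB at *; omega) (by unfold muB at *; omega) (by unfold muB at *; omega)

theorem loopB_skip {radj : List (List Int)} {visited : List Int} {v : Int} {i : Nat}
    (h : i < (getL radj v).length) (hg : ¬ getV visited ((getL radj v)[i]) = 0)
    (order : List Int) (rest : List (Int × Nat)) :
    runB radj visited order ((v, i) :: rest) =
      runB radj visited order ((v, i + 1) :: rest) := by
  unfold runB
  rw [loopB_succ_cons, dif_pos h, if_neg hg]
  have hd := decSkip radj visited v i rest h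
  exact loopB_irrel (muB radj visited ((v, i) :: rest)) _ _ radj _ order _
    (by unfold muB at *; omega) (by unfold muB at *; omega) (by unfold muB at *; omega)

theorem loopB_pop {radj : List (List Int)} {visited : List Int} {v : Int} {i : Nat}
    (h : ¬ i < (getL radj v).length) (order : List Int) (rest : List (Int × Nat)) :
    runB radj visited order ((v, i) :: rest) =
      runB radj visited (order ++ [v]) rest := by
  unfold runB
  rw [loopB_succ_cons, dif_neg h]
  have hd := decPop radj visited v i rest
  exact loopB_irrel (muB radj visited ((v, i) :: rest)) _ _ radj _ _ _
    (by unfold muB at *; omega) (by unfold muB at *; omega) (by unfold muB at *; omega)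


-- the "for w in radj[v]" loop of explore, as a standalone definition for the proofs
-- (definitionally the foldl inside exploreA)
def exploreListA (f : Nat) (radj : List (List Int)) (ws : List Int) (st : StA) : Option StA :=
  ws.foldl
    (fun ost w => ost.bind fun st' =>
      if getV st'.visit w = 0 then exploreA f radj w st' else some st')
    (some st)


theorem length_setV (xs : List Int) (i x : Int) : (setV xs i x).length = xs.length := by
  unfold setV PySem.List.pySetD PySem.List.pySet?
  cases hk : PySem.List.pyIdx? xs.length i <;> simp [List.length_set]

theorem Zv_setV_le (xs : List Int) (i : Int) : Zv (setV xs i 1) ≤ Zv xs := by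
  unfold setV PySem.List.pySetD PySem.List.pySet? Zv
  cases hk : PySem.List.pyIdx? xs.length i with
  | none => simp
  | some k =>
    have hlt := pyIdx_lt hk
    simp only [Option.map_some, Option.getD_some]
    rw [List.count_set (a := (1 : Int)) (b := (0 : Int)) hlt]
    simp

theorem Zv_pos {xs : List Int} {i : Int} (h : getV xs i = 0) : 0 < Zv xs := by
  obtain ⟨k, _, hlt, hx⟩ := getV_zero_inv h
  obtain ⟨_, e⟩ := List.getElem?_eq_some_iff.mp hx
  exact List.count_pos_iff.mpr (by rw [← e]; exact List.getElem_mem hlt)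

-- one-step equations of exploreA / exploreListA
theorem exploreA_succ (f : Nat) (radj : List (List Int)) (v : Int) (st : StA) :
    exploreA (f + 1) radj v st =
      (exploreListA f radj (getL radj v)
          { st with visit := setV st.visit v 1, pre := setV st.pre v st.clock,
                    clock := st.clock + 1 }).map
        (fun st2 => { st2 with post := setV st2.post v st2.clock, clock := st2.clock + 1,
                               stack := st2.stack ++ [v] }) := by
  simp only [exploreA]; rfl

theorem exploreListA_nil (f : Nat) (radj : List (List Int)) (st : StA) :
    exploreListA f radj [] st = some st := rfl

theorem exploreListA_foldl_none (f : Nat) (radj : List (List Int)) (ws : List Int) :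
    ws.foldl
      (fun ost w => ost.bind fun st' =>
        if getV st'.visit w = 0 then exploreA f radj w st' else some st')
      none = none := by
  induction ws with
  | nil => rfl
  | cons w ws ih => simp only [List.foldl_cons, Option.bind_none]; exact ih

theorem exploreListA_cons (f : Nat) (radj : List (List Int)) (w : Int) (ws : List Int) (st : StA) :
    exploreListA f radj (w :: ws) st =
      if getV st.visit w = 0 then
        match exploreA f radj w st with
        | none => none
        | some st1 => exploreListA f radj ws st1
      else exploreListA f radj ws st := by
  unfold exploreListA
  simp only [List.foldl_cons, Option.bind_some]
  split
  · cases h : exploreA f radj w st with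
    | none => exact exploreListA_foldl_none f radj ws
    | some st1 => rfl
  · rfl

-- shape invariants of A's explore: visit length preserved, unvisited count non-increasing,
-- the postorder stack only grows by appending
theorem shape_all : ∀ f : Nat,
    (∀ radj v st r, exploreA f radj v st = some r →
       r.visit.length = st.visit.length ∧ Zv r.visit ≤ Zv st.visit ∧
       ∃ δ, r.stack = st.stack ++ δ) ∧
    (∀ radj ws st r, exploreListA f radj ws st = some r →
       r.visit.length = st.visit.length ∧ Zv r.visit ≤ Zv st.visit ∧
       ∃ δ, r.stack = st.stack ++ δ) := by
  intro f
  induction f with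
  | zero =>
    have hA : ∀ radj (v : Int) st r, exploreA 0 radj v st = some r →
        r.visit.length = st.visit.length ∧ Zv r.visit ≤ Zv st.visit ∧
        ∃ δ, r.stack = st.stack ++ δ := by
      intro radj v st r hr; simp [exploreA] at hr
    refine ⟨hA, ?_⟩
    intro radj ws
    induction ws with
    | nil =>
      intro st r hr
      simp only [exploreListA_nil, Option.some.injEq] at hr
      exact ⟨by rw [← hr], by rw [← hr], [], by rw [← hr]; simp⟩
    | cons w ws ihw =>
      intro st r hr
      rw [exploreListA_cons] at hr
      split at hr
      · simp [exploreA] at hr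
      · exact ihw st r hr
  | succ f ih =>
    obtain ⟨_, ihL⟩ := ih
    have hA : ∀ radj (v : Int) st r, exploreA (f + 1) radj v st = some r →
        r.visit.length = st.visit.length ∧ Zv r.visit ≤ Zv st.visit ∧
        ∃ δ, r.stack = st.stack ++ δ := by
      intro radj v st r hr
      rw [exploreA_succ] at hr
      cases hm : exploreListA f radj (getL radj v)
          { st with visit := setV st.visit v 1, pre := setV st.pre v st.clock,
                    clock := st.clock + 1 } with
      | none => rw [hm] at hr; cases hr
      | some st2 =>
        rw [hm] at hr
        obtain ⟨hL, hZ, δ, hδ⟩ := ihL _ _ _ _ hm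
        simp only [Option.map_some, Option.some.injEq] at hr
        subst hr
        refine ⟨?_, ?_, δ ++ [v], ?_⟩
        · simpa [length_setV] using hL
        · calc Zv st2.visit ≤ _ := hZ
            _ ≤ Zv st.visit := by simpa using Zv_setV_le st.visit v
        · simp only [hδ]; simp
    refine ⟨hA, ?_⟩
    intro radj ws
    induction ws with
    | nil =>
      intro st r hr
      simp only [exploreListA_nil, Option.some.injEq] at hr
      exact ⟨by rw [← hr], by rw [← hr], [], by rw [← hr]; simp⟩
    | cons w ws ihw =>
      intro st r hr
      rw [exploreListA_cons] at hr
      split at hr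
      · cases hm : exploreA (f + 1) radj w st with
        | none => rw [hm] at hr; cases hr
        | some st1 =>
          rw [hm] at hr
          obtain ⟨hL1, hZ1, δ1, hδ1⟩ := hA _ _ _ _ hm
          obtain ⟨hL2, hZ2, δ2, hδ2⟩ := ihw st1 r hr
          exact ⟨hL2.trans hL1, hZ2.trans hZ1, δ1 ++ δ2,
            by rw [hδ2, hδ1, List.append_assoc]⟩
      · exact ihw st r hr

-- fuel sufficiency: with fuel above the number of unvisited vertices, A's explore never runs out
theorem suff_all : ∀ f : Nat,
    (∀ radj ws st, Zv st.visit ≤ f → ∃ r, exploreListA f radj ws st = some r) ∧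
    (∀ radj (v : Int) st, getV st.visit v = 0 → Zv st.visit ≤ f + 1 →
       ∃ r, exploreA (f + 1) radj v st = some r) := by
  intro f
  induction f with
  | zero =>
    have hL : ∀ radj ws st, Zv st.visit ≤ 0 → ∃ r, exploreListA 0 radj ws st = some r := by
      intro radj ws
      induction ws with
      | nil => intro st _; exact ⟨st, by simp [exploreListA]⟩
      | cons w ws ihw =>
        intro st hZ
        rw [exploreListA_cons]
        split
        · next hg => have := Zv_pos hg; omega
        · exact ihw st hZ
    refine ⟨hL, ?_⟩
    intro radj v st hg hZ
    rw [exploreA_succ]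
    have hZ1 : Zv (setV st.visit v 1) ≤ 0 := by have := Zv_setV hg; omega
    obtain ⟨r, hr⟩ := hL radj (getL radj v)
      { st with visit := setV st.visit v 1, pre := setV st.pre v st.clock,
                clock := st.clock + 1 } hZ1
    rw [hr]
    exact ⟨_, rfl⟩
  | succ f ih =>
    obtain ⟨_, ihA⟩ := ih
    have hL : ∀ radj ws st, Zv st.visit ≤ f + 1 → ∃ r, exploreListA (f + 1) radj ws st = some r := by
      intro radj ws
      induction ws with
      | nil => intro st _; exact ⟨st, by simp [exploreListA]⟩
      | cons w ws ihw =>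
        intro st hZ
        rw [exploreListA_cons]
        split
        · next hg =>
          obtain ⟨st1, hst1⟩ := ihA radj w st hg (by omega)
          rw [hst1]
          obtain ⟨_, hZ1, _⟩ := (shape_all (f + 1)).1 _ _ _ _ hst1
          exact ihw st1 (hZ1.trans hZ)
        · exact ihw st hZ
    refine ⟨hL, ?_⟩
    intro radj v st hg hZ
    rw [exploreA_succ]
    have hZ1 : Zv (setV st.visit v 1) ≤ f + 1 := by have := Zv_setV hg; omega
    obtain ⟨r, hr⟩ := hL radj (getL radj v)
      { st with visit := setV st.visit v 1, pre := setV st.pre v st.clock,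
                clock := st.clock + 1 } hZ1
    rw [hr]
    exact ⟨_, rfl⟩

-- the simulation core: B's frame loop retraces A's recursion step for step
theorem sim_all : ∀ f : Nat,
    (∀ radj (v : Int) st r δ, exploreA f radj v st = some r → r.stack = st.stack ++ δ →
       ∀ order rest, runB radj (setV st.visit v 1) order ((v, 0) :: rest)
         = runB radj r.visit (order ++ δ) rest) ∧
    (∀ radj (v : Int) (i : Nat) st r δ, i ≤ (getL radj v).length →
       exploreListA f radj ((getL radj v).drop i) st = some r → r.stack = st.stack ++ δ →
       ∀ order rest, runB radj st.visit order ((v, i) :: rest)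
         = runB radj r.visit (order ++ δ ++ [v]) rest) := by
  have listSim : ∀ f : Nat,
      (∀ radj (v : Int) st r δ, exploreA f radj v st = some r → r.stack = st.stack ++ δ →
        ∀ order rest, runB radj (setV st.visit v 1) order ((v, 0) :: rest)
          = runB radj r.visit (order ++ δ) rest) →
      (∀ radj (v : Int) (i : Nat) st r δ, i ≤ (getL radj v).length →
        exploreListA f radj ((getL radj v).drop i) st = some r → r.stack = st.stack ++ δ →
        ∀ order rest, runB radj st.visit order ((v, i) :: rest)
          = runB radj r.visit (order ++ δ ++ [v]) rest) := by
    intro f hA radj v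
    suffices H : ∀ n (i : Nat) st r δ, (getL radj v).length - i = n → i ≤ (getL radj v).length →
        exploreListA f radj ((getL radj v).drop i) st = some r → r.stack = st.stack ++ δ →
        ∀ order rest, runB radj st.visit order ((v, i) :: rest)
          = runB radj r.visit (order ++ δ ++ [v]) rest by
      intro i st r δ hi hr hδ order rest
      exact H _ i st r δ rfl hi hr hδ order rest
    intro n
    induction n using Nat.strong_induction_on with
    | _ n ihn =>
      intro i st r δ hn hi hr hδ order rest
      by_cases hlt : i < (getL radj v).length
      · have hd : (getL radj v).drop i = (getL radj v)[i] :: (getL radj v).drop (i + 1) :=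
          List.drop_eq_getElem_cons hlt
        rw [hd] at hr
        rw [exploreListA_cons] at hr
        split at hr
        · next hg =>
          cases hm : exploreA f radj ((getL radj v)[i]) st with
          | none => rw [hm] at hr; cases hr
          | some st1 =>
            rw [hm] at hr
            obtain ⟨_, _, δ1, hδ1⟩ := (shape_all f).1 _ _ _ _ hm
            obtain ⟨_, _, δ2, hδ2⟩ := (shape_all f).2 _ _ _ _ hr
            have hδ12 : δ = δ1 ++ δ2 := by
              apply List.append_cancel_left (as := st.stack)
              rw [← hδ, hδ2, hδ1, List.append_assoc]
            rw [loopB_push hlt hg order rest]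
            rw [hA radj _ st st1 δ1 hm hδ1 order ((v, i + 1) :: rest)]
            rw [ihn ((getL radj v).length - (i + 1)) (by omega) (i + 1) st1 r δ2
              rfl (by omega) hr hδ2 (order ++ δ1) rest]
            rw [hδ12]
            simp [List.append_assoc]
        · next hg =>
          rw [loopB_skip hlt hg order rest]
          exact ihn ((getL radj v).length - (i + 1)) (by omega) (i + 1) st r δ
            rfl (by omega) hr hδ order rest
      · have hi' : (getL radj v).length ≤ i := by omega
        rw [List.drop_eq_nil_of_le hi'] at hr
        simp only [exploreListA_nil, Option.some.injEq] at hr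
        subst hr
        have hδe : δ = [] := by
          have : st.stack ++ ([] : List Int) = st.stack ++ δ := by
            rw [List.append_nil]; exact hδ
          exact (List.append_cancel_left this).symm
        rw [loopB_pop hlt order rest, hδe]
        simp
  intro f
  induction f with
  | zero =>
    have hA : ∀ radj (v : Int) st r δ, exploreA 0 radj v st = some r → r.stack = st.stack ++ δ →
        ∀ order rest, runB radj (setV st.visit v 1) order ((v, 0) :: rest)
          = runB radj r.visit (order ++ δ) rest := by
      intro radj v st r δ hr; simp [exploreA] at hr
    exact ⟨hA, listSim 0 hA⟩
  | succ f ih =>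
    obtain ⟨ihA, _⟩ := ih
    have hA : ∀ radj (v : Int) st r δ, exploreA (f + 1) radj v st = some r →
        r.stack = st.stack ++ δ →
        ∀ order rest, runB radj (setV st.visit v 1) order ((v, 0) :: rest)
          = runB radj r.visit (order ++ δ) rest := by
      intro radj v st r δ hr hδ order rest
      rw [exploreA_succ] at hr
      cases hm : exploreListA f radj (getL radj v)
          { st with visit := setV st.visit v 1, pre := setV st.pre v st.clock,
                    clock := st.clock + 1 } with
      | none => rw [hm] at hr; cases hr
      | some st2 =>
        rw [hm] at hr
        simp only [Option.map_some, Option.some.injEq] at hr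
        obtain ⟨_, _, δ2, hδ2⟩ := (shape_all f).2 _ _ _ _ hm
        have hm' : exploreListA f radj ((getL radj v).drop 0)
            { st with visit := setV st.visit v 1, pre := setV st.pre v st.clock,
                      clock := st.clock + 1 } = some st2 := by
          rw [List.drop_zero]; exact hm
        have hstep := listSim f ihA radj v 0
          { st with visit := setV st.visit v 1, pre := setV st.pre v st.clock,
                    clock := st.clock + 1 } st2 δ2 (Nat.zero_le _) hm' hδ2 order rest
        have hδv : δ = δ2 ++ [v] := by
          apply List.append_cancel_left (as := st.stack)
          rw [← hδ, ← hr]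
          simp only [hδ2]
          simp [List.append_assoc]
        rw [hδv]
        have hrv : r.visit = st2.visit := by rw [← hr]
        rw [hrv, ← List.append_assoc]
        exact hstep
    exact ⟨hA, listSim (f + 1) hA⟩

-- the two outer for-loops agree
theorem topSim (radj : List (List Int)) : ∀ vs st, st.visit.length = radj.length →
    ∃ st', dfsLoopA (radj.length + 1) radj vs st = some st' ∧
      dfsOuterB radj vs st.visit st.stack = (st'.visit, st'.stack) ∧
      st'.visit.length = radj.length := by
  intro vs
  induction vs with
  | nil => intro st h; exact ⟨st, rfl, rfl, h⟩
  | cons s vs ih =>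
    intro st hlen
    by_cases hg : getV st.visit s = 0
    · have hZ : Zv st.visit ≤ radj.length := by
        rw [← hlen]; exact List.count_le_length
      obtain ⟨st1, hst1⟩ := (suff_all radj.length).2 radj s st hg (by omega)
      obtain ⟨hL1, _, δ, hδ⟩ := (shape_all _).1 _ _ _ _ hst1
      have hB := (sim_all _).1 radj s st st1 δ hst1 hδ st.stack []
      rw [loopB_nil] at hB
      obtain ⟨st', h1, h2, h3⟩ := ih st1 (by rw [hL1, hlen])
      refine ⟨st', ?_, ?_, h3⟩
      · simp only [dfsLoopA, if_pos hg, hst1]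
        exact h1
      · simp only [dfsOuterB, if_pos hg]
        have hrw : loopB (muB radj (setV st.visit s 1) [(s, 0)] + 1) radj
            (setV st.visit s 1) st.stack [(s, 0)]
            = runB radj (setV st.visit s 1) st.stack [(s, 0)] := rfl
        rw [hrw, hB]
        simp only
        rw [← hδ]
        exact h2
    · obtain ⟨st', h1, h2, h3⟩ := ih st hlen
      refine ⟨st', ?_, ?_, h3⟩
      · simp only [dfsLoopA, if_neg hg]
        exact h1
      · simp only [dfsOuterB, if_neg hg]
        exact h2

theorem dfs_eq_alt (radj : List (List Int)) : dfs radj = dfs_alt radj := by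
  unfold dfs dfs_alt
  obtain ⟨st', h1, h2, _⟩ := topSim radj (PySem.List.pyRange 0 (radj.length : Int) 1)
    ⟨List.replicate radj.length 0, List.replicate radj.length 0,
     List.replicate radj.length 0, 0, []⟩ (by simp)
  rw [h1]
  simp only
  rw [h2]

-- ===== VERDICT (by name: the statement is the Claim_ definition above) =====
theorem dfs_spec : Claim_equal_dfs := by
  intro radj _ _
  unfold Spec_dfs
  exact dfs_eq_alt radj
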